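-- pv_equiv track=rewrite | github.com/prasadsheetal/Hack-2025-Mitosis | app.py | style_sequence
-- ===== SOURCE A (Python) =====
-- def style_sequence(sequence, query):
--     if not query:
--         return sequence
--
--     lower_sequence = sequence.lower()
--     lower_query = query.lower()
--
--     styled_sequence = []
--     start = 0
--
--     while start < len(lower_sequence):
--         match_index = lower_sequence.find(lower_query, start)
--         if match_index == -1:
--             styled_sequence.append(sequence[start:])
--             break
--
--         styled_sequence.append(sequence[start:match_index])
--
--         styled_sequence.append(
--             f"<span style='color: red;'>{sequence[match_index:match_index + len(query)]}</span>"
--         )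
--
--         start = match_index + len(query)
--
--     return "".join(styled_sequence)
-- ===== SOURCE B (Python) =====
-- def style_sequence(sequence, query):
--     if not query:
--         return sequence
--
--     lower_sequence = sequence.lower()
--     lower_query = query.lower()
--     m = len(query)
--     n = len(sequence)
--
--     out = []
--     i = 0
--     while i < n:
--         if lower_sequence.startswith(lower_query, i):
--             out.append(f"<span style='color: red;'>{sequence[i:i+m]}</span>")
--             i += m
--         else:
--             out.append(sequence[i:i+1])
--             i += 1
--     return "".join(out)
-- ===== Notes on version B (the rewrite author's own statement) =====
-- stated objective: alternative
-- what changed: Replaces A's find()-driven jumps that emit whole between-match slices with a single per-position scan that tests startswith at every index, emitting one character or one wrapped match at a time.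
import Mathlib
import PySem

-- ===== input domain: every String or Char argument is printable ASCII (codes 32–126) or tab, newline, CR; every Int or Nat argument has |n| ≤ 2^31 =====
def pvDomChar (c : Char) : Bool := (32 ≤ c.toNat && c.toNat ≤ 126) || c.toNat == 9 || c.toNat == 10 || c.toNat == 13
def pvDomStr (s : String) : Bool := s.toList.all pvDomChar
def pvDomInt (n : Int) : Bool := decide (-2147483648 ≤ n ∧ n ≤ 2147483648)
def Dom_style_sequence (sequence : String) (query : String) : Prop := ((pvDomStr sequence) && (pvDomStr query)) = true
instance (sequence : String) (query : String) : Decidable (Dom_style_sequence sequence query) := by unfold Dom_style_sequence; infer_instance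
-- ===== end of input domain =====

-- B scans every position with a startswith test instead of A's find()-jumps; objective: alternative (same exact output, different traversal).

-- ===== PORT A =====
def pvSpanOpen : List Char := "<span style='color: red;'>".toList
def pvSpanClose : List Char := "</span>".toList

-- A's while loop: find the next occurrence from `start`, emit the gap slice, the wrapped
-- match, and continue at match+len(query); fuel makes the loop total (adequate at ls.length+1).
def styleLoopA (s ls lq : List Char) (qlen : Nat) : Nat → Nat → List Char
  | 0, _ => []
  | fuel+1, start =>
    if start < ls.length then
      let j := PySem.Chars.findFrom ls lq (start : Int) none
      if j = -1 then PySem.List.slice s (some (start : Int)) none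
      else
        PySem.List.slice s (some (start : Int)) (some j)
        ++ pvSpanOpen ++ PySem.List.slice s (some j) (some (j + (qlen : Int))) ++ pvSpanClose
        ++ styleLoopA s ls lq qlen fuel (j.toNat + qlen)
    else []

def style_sequence (sequence : String) (query : String) : String :=
  if query.toList = [] then sequence
  else
    String.ofList (styleLoopA sequence.toList (PySem.Chars.lower sequence.toList)
      (PySem.Chars.lower query.toList) query.toList.length
      ((PySem.Chars.lower sequence.toList).length + 1) 0)

-- ===== PORT B =====
-- B's while loop: at each index test startswith on the lowered string; emit either the
-- wrapped m-slice (advance by m) or the single-character slice (advance by 1).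
def styleLoopB (s ls lq : List Char) (m : Nat) : Nat → Nat → List Char
  | 0, _ => []
  | fuel+1, i =>
    if i < s.length then
      if PySem.Chars.startswith (ls.drop i) lq then
        pvSpanOpen ++ PySem.List.slice s (some (i : Int)) (some (((i + m : Nat)) : Int)) ++ pvSpanClose
          ++ styleLoopB s ls lq m fuel (i + m)
      else
        PySem.List.slice s (some (i : Int)) (some (((i + 1 : Nat)) : Int))
          ++ styleLoopB s ls lq m fuel (i + 1)
    else []

def style_sequence_alt (sequence : String) (query : String) : String :=
  if query.toList = [] then sequence
  else
    String.ofList (styleLoopB sequence.toList (PySem.Chars.lower sequence.toList)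
      (PySem.Chars.lower query.toList) query.toList.length
      (sequence.toList.length + 1) 0)

-- ===== PRECONDITION & SPEC =====
def Spec_style_sequence (sequence : String) (query : String) (out : String) : Prop := out = style_sequence_alt sequence query
instance (sequence : String) (query : String) (out : String) : Decidable (Spec_style_sequence sequence query out) := by unfold Spec_style_sequence; infer_instance

-- ===== CLAIM (what is proved, stated in full; the proofs are below) =====
def Claim_equal_style_sequence : Prop := ∀ (sequence : String) (query : String), Dom_style_sequence sequence query → Spec_style_sequence sequence query (style_sequence sequence query)

-- ===== LEMMAS AND PROOFS =====

theorem pv_no_prefix_of_no_infix {lq ls : List Char} {start k : Nat}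
    (h : ¬ lq <:+: ls.drop start) (hk : start ≤ k) : ¬ lq <+: ls.drop k := by
  intro hp
  apply h
  have hdd : ls.drop k = (ls.drop start).drop (k - start) := by
    rw [List.drop_drop]; congr 1; omega
  exact (hp.isInfix).trans (hdd ▸ (List.drop_suffix (k - start) (ls.drop start)).isInfix)

theorem styleLoopB_noMatch (s ls lq : List Char) (m : Nat) :
    ∀ (fuel i : Nat), s.length - i < fuel →
      (∀ k, i ≤ k → ¬ lq <+: ls.drop k) →
      styleLoopB s ls lq m fuel i = s.drop i := by
  intro fuel
  induction fuel with
  | zero => intro i h; omega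
  | succ f ih =>
    intro i hfuel hno
    by_cases hi : i < s.length
    · have hsw : PySem.Chars.startswith (ls.drop i) lq = false := by
        rw [Bool.eq_false_iff]
        intro h
        exact hno i le_rfl ((PySem.Chars.startswith_iff _ _).mp h)
      have : styleLoopB s ls lq m (f+1) i
          = PySem.List.slice s (some (i : Int)) (some (((i + 1 : Nat)) : Int))
            ++ styleLoopB s ls lq m f (i + 1) := by
        simp [styleLoopB, hi, hsw]
      rw [this, PySem.List.slice_natCast, ih (i+1) (by omega) (fun k hk => hno k (by omega))]
      rw [List.drop_eq_getElem_cons hi]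
      simp
    · simp [styleLoopB, hi, List.drop_eq_nil_of_le (by omega : s.length ≤ i)]

theorem styleLoopB_skip (s ls lq : List Char) (m : Nat) :
    ∀ (fuel i jn : Nat), i ≤ jn → jn ≤ s.length → s.length - i < fuel →
      (∀ k, i ≤ k → k < jn → ¬ lq <+: ls.drop k) →
      styleLoopB s ls lq m fuel i
        = (s.drop i).take (jn - i) ++ styleLoopB s ls lq m (fuel - (jn - i)) jn := by
  intro fuel
  induction fuel with
  | zero => intro i jn h1 h2 h3; omega
  | succ f ih =>
    intro i jn hij hjn hfuel hno
    by_cases heq : i = jn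
    · subst heq; simp
    · have hi : i < s.length := by omega
      have hsw : PySem.Chars.startswith (ls.drop i) lq = false := by
        rw [Bool.eq_false_iff]
        intro h
        exact hno i le_rfl (by omega) ((PySem.Chars.startswith_iff _ _).mp h)
      have hstep : styleLoopB s ls lq m (f+1) i
          = PySem.List.slice s (some (i : Int)) (some (((i + 1 : Nat)) : Int))
            ++ styleLoopB s ls lq m f (i + 1) := by
        simp [styleLoopB, hi, hsw]
      rw [hstep, PySem.List.slice_natCast,
        ih (i+1) jn (by omega) hjn (by omega) (fun k hk1 hk2 => hno k (by omega) hk2)]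
      have h2 : (f + 1) - (jn - i) = f - (jn - (i + 1)) := by omega
      have e1 : (i+1) - i = 1 := by omega
      rw [e1, h2]
      have hchunk : List.take (jn - i) (List.drop i s)
          = List.take 1 (List.drop i s)
            ++ List.take (jn - (i+1)) (List.drop (i+1) s) := by
        have e2 : jn - i = 1 + (jn - (i+1)) := by omega
        rw [e2, List.take_add, List.drop_drop]
      rw [hchunk, List.append_assoc]

theorem styleLoopB_fuelCongr (s ls lq : List Char) (m : Nat) (hm : 1 ≤ m) :
    ∀ (f1 f2 i : Nat), s.length - i < f1 → s.length - i < f2 →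
      styleLoopB s ls lq m f1 i = styleLoopB s ls lq m f2 i := by
  intro f1
  induction f1 with
  | zero => intro f2 i h; omega
  | succ f ih =>
    intro f2 i h1 h2
    cases f2 with
    | zero => omega
    | succ g =>
      by_cases hi : i < s.length
      · by_cases hsw : PySem.Chars.startswith (ls.drop i) lq
        · simp only [styleLoopB, hi, hsw, if_true]
          rw [ih g (i + m) (by omega) (by omega)]
        · simp only [styleLoopB, hi, if_true, hsw, Bool.false_eq_true, if_false]
          rw [ih g (i + 1) (by omega) (by omega)]
      · simp [styleLoopB, hi]

theorem styleLoop_main (s ls lq : List Char) (m : Nat) (hm : 1 ≤ m)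
    (hls : ls.length = s.length) (hlq : lq.length = m) :
    ∀ (fA fB start : Nat), s.length - start < fA → s.length - start < fB →
      styleLoopA s ls lq m fA start = styleLoopB s ls lq m fB start := by
  intro fA
  induction fA with
  | zero => intro fB start h; omega
  | succ f ih =>
    intro fB start hfA hfB
    by_cases hstart : start < ls.length
    · have hstart' : start < s.length := by omega
      have hstartle : start ≤ ls.length := by omega
      by_cases hj : PySem.Chars.findFrom ls lq (start : Int) none = -1
      · -- no further match: A drops, B scans to the end
        have hAeq : styleLoopA s ls lq m (f+1) start
            = PySem.List.slice s (some (start : Int)) none := by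
          simp [styleLoopA, hstart, hj]
        rw [hAeq, PySem.List.slice_from_natCast]
        have hnoInf : ¬ lq <:+: ls.drop start :=
          (PySem.Chars.findFrom_natCast_eq_neg_one_iff ls lq start hstartle).mp hj
        rw [styleLoopB_noMatch s ls lq m fB start hfB
          (fun k hk => pv_no_prefix_of_no_infix hnoInf hk)]
      · obtain ⟨hge, hpre, hmin⟩ := PySem.Chars.findFrom_natCast_spec ls lq start hstartle hj
        set j := PySem.Chars.findFrom ls lq (start : Int) none with hjdef
        have hj0 : 0 ≤ j := le_trans (by exact_mod_cast Int.natCast_nonneg start) hge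
        have hjcast : ((j.toNat : Nat) : Int) = j := Int.toNat_of_nonneg hj0
        set jn := j.toNat with hjn
        have hjge : start ≤ jn := by omega
        have hlqne : lq ≠ [] := by
          intro h; rw [h] at hlq; simp at hlq; omega
        have hjlt : jn < ls.length := by
          by_contra hcon
          have : ls.drop jn = [] := List.drop_eq_nil_of_le (by omega)
          rw [this, List.prefix_nil] at hpre
          exact hlqne hpre
        have hjm : jn + m ≤ s.length := by
          have := hpre.length_le
          simp [hlq] at this
          omega
        -- A's step
        have hAeq : styleLoopA s ls lq m (f+1) start
            = (s.drop start).take (jn - start)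
              ++ pvSpanOpen ++ (s.drop jn).take m ++ pvSpanClose
              ++ styleLoopA s ls lq m f (jn + m) := by
          simp only [styleLoopA, hstart, if_true, hj, if_false, ← hjdef]
          rw [← hjcast]
          rw [PySem.List.slice_natCast]
          have : ((jn : Int) + (m : Int)) = (((jn + m : Nat)) : Int) := by push_cast; ring
          rw [this, PySem.List.slice_natCast]
          have h4 : jn + m - jn = m := by omega
          rw [h4]
          simp only [Int.toNat_natCast]
        -- B's side: skip to jn, then one match step
        have hBskip := styleLoopB_skip s ls lq m fB start jn hjge (by omega) hfB
          (fun k hk1 hk2 => hmin k hk1 (by omega))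
        have hBfuel : styleLoopB s ls lq m (fB - (jn - start)) jn
            = styleLoopB s ls lq m ((s.length - jn) + 1) jn :=
          styleLoopB_fuelCongr s ls lq m hm _ _ jn (by omega) (by omega)
        have hsw : PySem.Chars.startswith (ls.drop jn) lq = true :=
          (PySem.Chars.startswith_iff _ _).mpr hpre
        have hjn' : jn < s.length := by omega
        have hBstep : styleLoopB s ls lq m ((s.length - jn) + 1) jn
            = pvSpanOpen ++ (s.drop jn).take m ++ pvSpanClose
              ++ styleLoopB s ls lq m (s.length - jn) (jn + m) := by
          simp only [styleLoopB, hjn', if_true, hsw]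
          rw [PySem.List.slice_natCast]
          have h4 : jn + m - jn = m := by omega
          rw [h4]
        have hrec : styleLoopA s ls lq m f (jn + m)
            = styleLoopB s ls lq m (s.length - jn) (jn + m) :=
          ih _ (jn + m) (by omega) (by omega)
        rw [hAeq, hBskip, hBfuel, hBstep, hrec]
        simp [List.append_assoc]
    · have hstart' : ¬ start < s.length := by omega
      cases fB with
      | zero => simp [styleLoopA, styleLoopB, hstart]
      | succ g => simp [styleLoopA, styleLoopB, hstart, hstart']

-- ===== VERDICT (by name: the statement is the Claim_ definition above) =====
theorem style_sequence_spec : Claim_equal_style_sequence := by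
  intro sequence query _
  unfold Spec_style_sequence style_sequence style_sequence_alt
  by_cases hq : query.toList = []
  · simp [hq]
  · simp only [hq, if_false]
    congr 1
    have hm : 1 ≤ query.toList.length := by
      cases h : query.toList with
      | nil => exact absurd h hq
      | cons a l => simp
    have hls : (PySem.Chars.lower sequence.toList).length = sequence.toList.length := by
      simp [PySem.Chars.lower]
    have hlq : (PySem.Chars.lower query.toList).length = query.toList.length := by
      simp [PySem.Chars.lower]
    exact styleLoop_main sequence.toList _ _ _ hm hls hlq _ _ 0 (by omega) (by omega)
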